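-- pv_equiv track=rewrite | github.com/JamesMCo/Advent-Of-Code | 2015/05/Part2.py | solve
-- ===== SOURCE A (Python) =====
-- def solve(puzzle_input):
--     nice = 0
--
--     for i in puzzle_input:
--         pairs = False
--         gap = False
--
--         for x in range(len(i) - 1):
--             if i.count(i[x:x+2]) > 1:
--                 pairs = True
--
--         for x in range(len(i) - 2):
--             if i[x] == i[x+2]:
--                 gap = True
--
--         if pairs == True and gap == True:
--             nice += 1
--
--     return nice
-- ===== SOURCE B (Python) =====
-- def solve(puzzle_input):
--     nice = 0
--
--     for line in puzzle_input:
--         gap = False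
--         for a, b in zip(line, line[2:]):
--             if a == b:
--                 gap = True
--                 break
--         if not gap:
--             continue
--
--         seen = set()
--         pairs = False
--         for x in range(len(line) - 1):
--             if x >= 2:
--                 seen.add(line[x-2:x])
--             if line[x:x+2] in seen:
--                 pairs = True
--                 break
--
--         if pairs:
--             nice += 1
--
--     return nice
-- ===== Notes on version B (the rewrite author's own statement) =====
-- stated objective: faster
-- what changed: Replaces the per-position str.count scan (quadratic per line) by a gap check done first with early exit, skipping the pair work for lines without a gap, and a single linear pass with a set of pairs seen two positions back that stops at the first repeated pair.
import Mathlib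
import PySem

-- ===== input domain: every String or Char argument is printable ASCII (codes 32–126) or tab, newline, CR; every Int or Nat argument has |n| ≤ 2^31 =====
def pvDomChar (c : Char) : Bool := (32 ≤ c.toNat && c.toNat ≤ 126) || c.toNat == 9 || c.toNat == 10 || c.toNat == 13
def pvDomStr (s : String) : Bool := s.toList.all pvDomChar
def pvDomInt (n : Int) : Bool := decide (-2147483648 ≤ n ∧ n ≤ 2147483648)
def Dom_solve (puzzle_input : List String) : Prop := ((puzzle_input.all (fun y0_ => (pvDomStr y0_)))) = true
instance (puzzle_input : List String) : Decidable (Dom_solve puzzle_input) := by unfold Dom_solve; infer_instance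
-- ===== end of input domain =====

-- B checks the gap condition first with early exit and, only for lines with a gap, finds a
-- repeated pair in one linear pass with a set of the pairs seen two positions back (A rescans
-- the line with str.count at every position); objective: faster.

-- ===== PORT A =====
-- for x in range(len(i) - 1): if i.count(i[x:x+2]) > 1: pairs = True
def pairsLoopA (l : List Char) : Bool :=
  (PySem.List.pyRange 0 ((PySem.Chars.len l : Int) - 1) 1).foldl
    (fun pairs x =>
      if PySem.Chars.count l (PySem.List.slice l (some x) (some (x + 2))) > 1 then true else pairs)
    false

-- for x in range(len(i) - 2): if i[x] == i[x+2]: gap = True   (indices always in range)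
def gapLoopA (l : List Char) : Bool :=
  (PySem.List.pyRange 0 ((PySem.Chars.len l : Int) - 2) 1).foldl
    (fun gap x =>
      if PySem.List.pyGetD l x ' ' = PySem.List.pyGetD l (x + 2) ' ' then true else gap)
    false

def solve (puzzle_input : List String) : Int :=
  puzzle_input.foldl
    (fun nice i =>
      let l := i.toList
      let pairs := pairsLoopA l
      let gap := gapLoopA l
      if pairs == true && gap == true then nice + 1 else nice)
    0

-- ===== PORT B =====
-- for a, b in zip(line, line[2:]): if a == b: gap = True; break
def gapLoopB : List (Char × Char) → Bool
  | [] => false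
  | ab :: rest => if ab.1 = ab.2 then true else gapLoopB rest

-- for x in range(len(line) - 1): if x >= 2: seen.add(line[x-2:x]);
--   if line[x:x+2] in seen: pairs = True; break
def pairsLoopB (l : List Char) : List Int → PySem.Set (List Char) → Bool
  | [], _ => false
  | x :: rest, seen =>
    let seen' := if 2 ≤ x then PySem.Set.add seen (PySem.List.slice l (some (x - 2)) (some x))
                 else seen
    if seen'.contains (PySem.List.slice l (some x) (some (x + 2))) then true
    else pairsLoopB l rest seen'

def solve_alt (puzzle_input : List String) : Int :=
  puzzle_input.foldl
    (fun nice i =>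
      let l := i.toList
      let gap := gapLoopB (l.zip (PySem.List.slice l (some 2) none))
      if !gap then nice
      else if pairsLoopB l (PySem.List.pyRange 0 ((PySem.Chars.len l : Int) - 1) 1) PySem.Set.empty
      then nice + 1
      else nice)
    0

-- ===== PRECONDITION & SPEC =====
def Spec_solve (puzzle_input : List String) (out : Int) : Prop := out = solve_alt puzzle_input
instance (puzzle_input : List String) (out : Int) : Decidable (Spec_solve puzzle_input out) := by unfold Spec_solve; infer_instance

-- ===== CLAIM (what is proved, stated in full; the proofs are below) =====
def Claim_equal_solve : Prop := ∀ (puzzle_input : List String), Dom_solve puzzle_input → Spec_solve puzzle_input (solve puzzle_input)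

-- ===== LEMMAS AND PROOFS =====

-- the two-character window of l at position k
def pr (l : List Char) (k : Nat) : List Char := (l.drop k).take 2

-- "some pair occurs twice without overlap" and "some letter repeats with one between"
def PairProp (l : List Char) : Prop := ∃ i j, i + 2 ≤ j ∧ j + 2 ≤ l.length ∧ pr l i = pr l j
def GapProp (l : List Char) : Prop := ∃ k, k < l.length - 2 ∧ l.getD k ' ' = l.getD (k + 2) ' '

-- equation lemmas for PySem.Chars.count.go
theorem go_zero (sub l acc) : PySem.Chars.count.go sub 0 l acc = acc := rfl
theorem go_nil (sub fuel acc) : PySem.Chars.count.go sub fuel [] acc = acc := by cases fuel <;> rfl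
theorem go_succ (sub : List Char) (fuel h t acc) : PySem.Chars.count.go sub (fuel+1) (h :: t) acc =
    if sub.isPrefixOf (h :: t) then PySem.Chars.count.go sub fuel (List.drop sub.length (h :: t)) (acc + 1)
    else PySem.Chars.count.go sub fuel t acc := rfl

theorem go_add (sub : List Char) : ∀ (fuel : Nat) (l : List Char) (acc : Nat),
    PySem.Chars.count.go sub fuel l acc = acc + PySem.Chars.count.go sub fuel l 0 := by
  intro fuel
  induction fuel with
  | zero => intro l acc; simp [go_zero]
  | succ f ih =>
    intro l acc
    cases l with
    | nil => simp [go_nil]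
    | cons h t =>
      rw [go_succ, go_succ]
      split
      · rw [ih (List.drop sub.length (h :: t)) (acc + 1),
          ih (List.drop sub.length (h :: t)) (0 + 1)]
        omega
      · rw [ih t acc]

theorem count_eq_go (l sub : List Char) (h : sub ≠ []) :
    PySem.Chars.count l sub = PySem.Chars.count.go sub l.length l 0 := by
  simp [PySem.Chars.count, h]

theorem go_one_occ (sub : List Char) : ∀ (fuel : Nat) (l : List Char), l.length ≤ fuel →
    1 ≤ PySem.Chars.count.go sub fuel l 0 → ∃ i, sub <+: l.drop i := by
  intro fuel
  induction fuel with
  | zero =>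
    intro l hl h
    have : l = [] := List.length_eq_zero_iff.mp (by omega)
    subst this; simp [go_nil] at h
  | succ f ih =>
    intro l hl h
    cases l with
    | nil => simp [go_nil] at h
    | cons c t =>
      rw [go_succ] at h
      by_cases hp : sub.isPrefixOf (c :: t)
      · exact ⟨0, by simpa using List.isPrefixOf_iff_prefix.mp hp⟩
      · simp [hp] at h
        obtain ⟨i, hi⟩ := ih t (by simp at hl; omega) h
        exact ⟨i + 1, by simpa [List.drop_succ_cons] using hi⟩

theorem occ_go_one (sub : List Char) (hs : sub ≠ []) : ∀ (fuel : Nat) (l : List Char) (i : Nat),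
    l.length ≤ fuel → sub <+: l.drop i → 1 ≤ PySem.Chars.count.go sub fuel l 0 := by
  intro fuel
  induction fuel with
  | zero =>
    intro l i hl hocc
    have : l = [] := List.length_eq_zero_iff.mp (by omega)
    subst this
    simp [List.prefix_nil] at hocc
    exact absurd hocc hs
  | succ f ih =>
    intro l i hl hocc
    cases l with
    | nil =>
      simp [List.prefix_nil] at hocc
      exact absurd hocc hs
    | cons c t =>
      rw [go_succ]
      by_cases hp : sub.isPrefixOf (c :: t)
      · simp only [hp, if_true]
        rw [go_add]; omega
      · simp only [hp, Bool.false_eq_true, if_false]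
        cases i with
        | zero =>
          simp at hocc
          exact absurd (List.isPrefixOf_iff_prefix.mpr hocc) hp
        | succ i =>
          exact ih t i (by simp at hl; omega) (by simpa [List.drop_succ_cons] using hocc)

theorem go_two_occ (sub : List Char) (hs : sub ≠ []) : ∀ (fuel : Nat) (l : List Char),
    l.length ≤ fuel → 2 ≤ PySem.Chars.count.go sub fuel l 0 →
    ∃ i j, i + sub.length ≤ j ∧ sub <+: l.drop i ∧ sub <+: l.drop j := by
  intro fuel
  induction fuel with
  | zero =>
    intro l hl h
    have : l = [] := List.length_eq_zero_iff.mp (by omega)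
    subst this; simp [go_nil] at h
  | succ f ih =>
    intro l hl h
    cases l with
    | nil => simp [go_nil] at h
    | cons c t =>
      rw [go_succ] at h
      by_cases hp : sub.isPrefixOf (c :: t)
      · simp only [hp, if_true] at h
        rw [go_add] at h
        have h1 : 1 ≤ PySem.Chars.count.go sub f (List.drop sub.length (c :: t)) 0 := by omega
        have hlen : (List.drop sub.length (c :: t)).length ≤ f := by
          have : 0 < sub.length := List.length_pos_of_ne_nil hs
          simp; simp at hl; omega
        obtain ⟨i, hi⟩ := go_one_occ sub f _ hlen h1
        rw [List.drop_drop] at hi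
        exact ⟨0, sub.length + i, by omega, by
          simpa using List.isPrefixOf_iff_prefix.mp hp, hi⟩
      · simp only [hp, Bool.false_eq_true, if_false] at h
        obtain ⟨i, j, hij, hi, hj⟩ := ih t (by simp at hl; omega) h
        exact ⟨i + 1, j + 1, by omega, by simpa [List.drop_succ_cons] using hi,
          by simpa [List.drop_succ_cons] using hj⟩

theorem two_occ_go (sub : List Char) (hs : sub ≠ []) : ∀ (fuel : Nat) (l : List Char) (i j : Nat),
    l.length ≤ fuel → i + sub.length ≤ j → sub <+: l.drop i → sub <+: l.drop j →
    2 ≤ PySem.Chars.count.go sub fuel l 0 := by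
  intro fuel
  induction fuel with
  | zero =>
    intro l i j hl _ hocc _
    have : l = [] := List.length_eq_zero_iff.mp (by omega)
    subst this
    simp [List.prefix_nil] at hocc
    exact absurd hocc hs
  | succ f ih =>
    intro l i j hl hij hi hj
    cases l with
    | nil =>
      simp [List.prefix_nil] at hi
      exact absurd hi hs
    | cons c t =>
      rw [go_succ]
      by_cases hp : sub.isPrefixOf (c :: t)
      · simp only [hp, if_true]
        rw [go_add]
        have hs1 : 0 < sub.length := List.length_pos_of_ne_nil hs
        have hj' : sub <+: (List.drop sub.length (c :: t)).drop (j - sub.length) := by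
          rw [List.drop_drop]
          have : sub.length + (j - sub.length) = j := by omega
          rw [this]; exact hj
        have hlen : (List.drop sub.length (c :: t)).length ≤ f := by simp; simp at hl; omega
        have := occ_go_one sub hs f _ (j - sub.length) hlen hj'
        omega
      · simp only [hp, Bool.false_eq_true, if_false]
        cases i with
        | zero =>
          simp at hi
          exact absurd (List.isPrefixOf_iff_prefix.mpr hi) hp
        | succ i =>
          have hj1 : 1 ≤ j := by omega
          have hjj : j - 1 + 1 = j := by omega
          refine ih t i (j - 1) (by simp at hl; omega) (by omega)
            (by simpa [List.drop_succ_cons] using hi) ?_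
          have : sub <+: (c :: t).drop (j - 1 + 1) := by rw [hjj]; exact hj
          simpa [List.drop_succ_cons] using this

theorem count_two_iff (l sub : List Char) (hs : sub ≠ []) :
    1 < PySem.Chars.count l sub ↔
    ∃ i j, i + sub.length ≤ j ∧ sub <+: l.drop i ∧ sub <+: l.drop j := by
  rw [count_eq_go l sub hs]
  constructor
  · intro h; exact go_two_occ sub hs l.length l le_rfl (by omega)
  · rintro ⟨i, j, hij, hi, hj⟩
    have := two_occ_go sub hs l.length l i j le_rfl hij hi hj
    omega

theorem pr_length (l : List Char) (k : Nat) (h : k + 2 ≤ l.length) : (pr l k).length = 2 := by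
  simp [pr]; omega

theorem pr_ne_nil (l : List Char) (k : Nat) (h : k + 2 ≤ l.length) : pr l k ≠ [] := by
  intro hc
  have := pr_length l k h
  rw [hc] at this; simp at this

theorem pr_prefix (l : List Char) (k : Nat) : pr l k <+: l.drop k := List.take_prefix _ _

theorem prefix_pr_iff (l : List Char) (i : Nat) (q : List Char) (hq : q.length = 2) :
    q <+: l.drop i ↔ (i + 2 ≤ l.length ∧ pr l i = q) := by
  rw [List.prefix_iff_eq_take, hq]
  constructor
  · intro h
    have hlen : q.length = (List.take 2 (l.drop i)).length := by rw [← h]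
    simp [hq] at hlen
    exact ⟨by omega, by rw [pr, h]⟩
  · rintro ⟨_, h⟩; rw [← h, pr]

theorem foldl_ite_or (p : Int → Prop) [DecidablePred p] : ∀ (xs : List Int) (b : Bool),
    xs.foldl (fun acc x => if p x then true else acc) b = (b || xs.any fun x => decide (p x)) := by
  intro xs
  induction xs with
  | nil => intro b; simp
  | cons h t ih =>
    intro b
    rw [List.foldl_cons, ih, List.any_cons]
    by_cases hp : p h <;> simp [hp]

theorem pairsLoopA_iff (l : List Char) : pairsLoopA l = true ↔ PairProp l := by
  unfold pairsLoopA
  rw [PySem.List.pyRange_one, foldl_ite_or]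
  simp only [PySem.Chars.len_eq, Bool.false_or, List.any_map, List.any_eq_true, List.mem_range,
    Function.comp, decide_eq_true_eq]
  have hm : ((l.length : Int) - 1 - 0).toNat = l.length - 1 := by omega
  rw [hm]
  constructor
  · rintro ⟨k, hk, hcount⟩
    have hk2 : k + 2 ≤ l.length := by omega
    have hsl : PySem.List.slice l (some ((0:Int) + k)) (some ((0:Int) + k + 2)) = pr l k := by
      have : ((0:Int) + k + 2) = ((k + 2 : Nat) : Int) := by push_cast; ring
      rw [this, zero_add, PySem.List.slice_natCast]
      simp [pr]
    rw [hsl] at hcount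
    obtain ⟨i, j, hij, hi, hj⟩ := (count_two_iff l (pr l k) (pr_ne_nil l k hk2)).mp hcount
    rw [pr_length l k hk2] at hij
    obtain ⟨hi2, hpi⟩ := (prefix_pr_iff l i (pr l k) (pr_length l k hk2)).mp hi
    obtain ⟨hj2, hpj⟩ := (prefix_pr_iff l j (pr l k) (pr_length l k hk2)).mp hj
    exact ⟨i, j, hij, hj2, by rw [hpi, hpj]⟩
  · rintro ⟨i, j, hij, hj2, hpr⟩
    have hi2 : i + 2 ≤ l.length := by omega
    refine ⟨i, by omega, ?_⟩
    have hsl : PySem.List.slice l (some ((0:Int) + i)) (some ((0:Int) + i + 2)) = pr l i := by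
      have : ((0:Int) + i + 2) = ((i + 2 : Nat) : Int) := by push_cast; ring
      rw [this, zero_add, PySem.List.slice_natCast]
      simp [pr]
    rw [hsl]
    refine (count_two_iff l (pr l i) (pr_ne_nil l i hi2)).mpr ⟨i, j, ?_, pr_prefix l i, ?_⟩
    · rw [pr_length l i hi2]; omega
    · rw [hpr]; exact pr_prefix l j

theorem gapLoopA_iff (l : List Char) : gapLoopA l = true ↔ GapProp l := by
  unfold gapLoopA GapProp
  rw [PySem.List.pyRange_one, foldl_ite_or]
  simp only [PySem.Chars.len_eq, Bool.false_or, List.any_map, List.any_eq_true, List.mem_range,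
    Function.comp, decide_eq_true_eq]
  have hm : ((l.length : Int) - 2 - 0).toNat = l.length - 2 := by omega
  rw [hm]
  have hx : ∀ k : Nat, PySem.List.pyGetD l ((0 : Int) + k) ' ' = l.getD k ' ' := by
    intro k; rw [zero_add, PySem.List.pyGetD_natCast]
  have hx2 : ∀ k : Nat, PySem.List.pyGetD l ((0 : Int) + k + 2) ' ' = l.getD (k + 2) ' ' := by
    intro k
    have h2 : ((0 : Int) + k + 2) = ((k + 2 : Nat) : Int) := by push_cast; ring
    rw [h2, PySem.List.pyGetD_natCast]
  simp only [hx, hx2]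

theorem gapLoopB_eq_any : ∀ zs : List (Char × Char),
    gapLoopB zs = zs.any (fun ab => decide (ab.1 = ab.2)) := by
  intro zs
  induction zs with
  | nil => rfl
  | cons ab rest ih =>
    rw [List.any_cons, ← ih]
    by_cases h : ab.1 = ab.2 <;> simp [gapLoopB, h]

theorem gapB_iff (l : List Char) :
    gapLoopB (l.zip (PySem.List.slice l (some 2) none)) = true ↔ GapProp l := by
  rw [gapLoopB_eq_any, PySem.List.slice_from l (by norm_num), List.any_eq_true]
  have ht : ((2 : Int)).toNat = 2 := rfl
  rw [ht]
  unfold GapProp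
  constructor
  · rintro ⟨ab, hmem, hab⟩
    obtain ⟨k, hk, hget⟩ := List.mem_iff_getElem.mp hmem
    have hk2 : k < l.length - 2 := by
      have hlz : (l.zip (l.drop 2)).length = min l.length (l.length - 2) := by
        rw [List.length_zip, List.length_drop]
      omega
    have hkl : k < l.length := by omega
    have hkd : k < (l.drop 2).length := by simp [List.length_drop]; omega
    rw [← hget] at hab
    rw [List.getElem_zip] at hab
    simp only [decide_eq_true_eq] at hab
    refine ⟨k, hk2, ?_⟩
    rw [List.getD_eq_getElem l ' ' hkl, List.getD_eq_getElem l ' ' (by omega : k + 2 < l.length)]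
    rw [List.getElem_drop] at hab
    simpa [Nat.add_comm] using hab
  · rintro ⟨k, hk, he⟩
    have hlz : k < (l.zip (l.drop 2)).length := by
      rw [List.length_zip, List.length_drop]; omega
    refine ⟨(l.zip (l.drop 2))[k], List.getElem_mem hlz, ?_⟩
    rw [List.getElem_zip]
    simp only [decide_eq_true_eq]
    rw [List.getElem_drop]
    rw [List.getD_eq_getElem l ' ' (by omega : k < l.length),
      List.getD_eq_getElem l ' ' (by omega : k + 2 < l.length)] at he
    simpa [Nat.add_comm] using he

theorem pairsLoopB_nil (l : List Char) (seen : PySem.Set (List Char)) :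
    pairsLoopB l [] seen = false := rfl

theorem pairsLoopB_cons (l : List Char) (x : Int) (rest : List Int)
    (seen : PySem.Set (List Char)) :
    pairsLoopB l (x :: rest) seen =
      (if ((if 2 ≤ x then PySem.Set.add seen (PySem.List.slice l (some (x - 2)) (some x))
            else seen).contains (PySem.List.slice l (some x) (some (x + 2)))) = true then true
       else pairsLoopB l rest
         (if 2 ≤ x then PySem.Set.add seen (PySem.List.slice l (some (x - 2)) (some x))
          else seen)) := rfl

-- the B pairs-loop invariant: seen holds exactly the windows ending at least two before m
theorem pairsLoopB_seg (l : List Char) : ∀ (cnt m : Nat) (b : Int)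
    (seen : PySem.Set (List Char)),
    (b - (m : Int)).toNat = cnt →
    (∀ q, q ∈ seen ↔ ∃ j, j + 3 ≤ m ∧ q = pr l j) →
    (pairsLoopB l (PySem.List.pyRange (m : Int) b 1) seen = true ↔
      ∃ x, m ≤ x ∧ x < m + cnt ∧ ∃ j, j + 2 ≤ x ∧ pr l j = pr l x) := by
  intro cnt
  induction cnt with
  | zero =>
    intro m b seen hb _
    have hnil : PySem.List.pyRange (m : Int) b 1 = [] := by
      rw [PySem.List.pyRange_one, hb]; rfl
    rw [hnil, pairsLoopB_nil]
    constructor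
    · intro h; simp at h
    · rintro ⟨x, h1, h2, _⟩; omega
  | succ cnt ih =>
    intro m b seen hb hseen
    have hcons : PySem.List.pyRange (m : Int) b 1 =
        (m : Int) :: PySem.List.pyRange ((m + 1 : Nat) : Int) b 1 := by
      rw [PySem.List.pyRange_one_cons (by omega : (m : Int) < b)]
      have e1 : ((m : Int) + 1) = ((m + 1 : Nat) : Int) := by push_cast; ring
      rw [e1]
    rw [hcons, pairsLoopB_cons]
    set seenStep := (if 2 ≤ (m : Int) then
        PySem.Set.add seen (PySem.List.slice l (some ((m : Int) - 2)) (some (m : Int)))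
      else seen) with hss
    have hseen1 : ∀ q, q ∈ seenStep ↔ ∃ j, j + 3 ≤ m + 1 ∧ q = pr l j := by
      intro q
      rw [hss]
      by_cases h2 : 2 ≤ m
      · have h2' : (2 : Int) ≤ (m : Int) := by exact_mod_cast h2
        have hc : ((m : Int) - 2) = ((m - 2 : Nat) : Int) := by omega
        have hsl : PySem.List.slice l (some ((m : Int) - 2)) (some (m : Int)) = pr l (m - 2) := by
          rw [hc, PySem.List.slice_natCast]
          have : m - (m - 2) = 2 := by omega
          rw [this, pr]
        rw [if_pos h2', hsl, PySem.Set.mem_add, hseen]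
        constructor
        · rintro (⟨j, hj, rfl⟩ | rfl)
          · exact ⟨j, by omega, rfl⟩
          · exact ⟨m - 2, by omega, rfl⟩
        · rintro ⟨j, hj, rfl⟩
          by_cases hjm : j + 3 ≤ m
          · exact Or.inl ⟨j, hjm, rfl⟩
          · have : j = m - 2 := by omega
            subst this; exact Or.inr rfl
      · have h2' : ¬ ((2 : Int) ≤ (m : Int)) := by exact_mod_cast h2
        rw [if_neg h2', hseen]
        constructor
        · rintro ⟨j, hj, rfl⟩; exact ⟨j, by omega, rfl⟩
        · rintro ⟨j, hj, rfl⟩; exact ⟨j, by omega, rfl⟩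
    have hslm : PySem.List.slice l (some (m : Int)) (some ((m : Int) + 2)) = pr l m := by
      have h2 : ((m : Int) + 2) = ((m + 2 : Nat) : Int) := by push_cast; ring
      rw [h2, PySem.List.slice_natCast]
      have : m + 2 - m = 2 := by omega
      rw [this, pr]
    rw [hslm]
    have hcb : (seenStep.contains (pr l m) = true) ↔ pr l m ∈ seenStep := by simp
    by_cases hc : pr l m ∈ seenStep
    · rw [if_pos (hcb.mpr hc)]
      obtain ⟨j, hj, he⟩ := (hseen1 _).mp hc
      simp only [true_iff]
      exact ⟨m, le_rfl, by omega, j, by omega, he.symm⟩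
    · rw [if_neg (fun h => hc (hcb.mp h))]
      rw [ih (m + 1) b seenStep (by omega) hseen1]
      constructor
      · rintro ⟨x, hx1, hx2, j, hj, he⟩
        exact ⟨x, by omega, by omega, j, hj, he⟩
      · rintro ⟨x, hx1, hx2, j, hj, he⟩
        by_cases hxm : x = m
        · subst hxm
          exact absurd ((hseen1 _).mpr ⟨j, by omega, he.symm⟩) hc
        · exact ⟨x, by omega, by omega, j, hj, he⟩

theorem pairsB_iff (l : List Char) :
    pairsLoopB l (PySem.List.pyRange 0 ((PySem.Chars.len l : Int) - 1) 1) PySem.Set.empty = true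
      ↔ PairProp l := by
  have hinv : ∀ q, q ∈ (PySem.Set.empty : PySem.Set (List Char)) ↔
      ∃ j, j + 3 ≤ 0 ∧ q = pr l j := by
    intro q
    constructor
    · intro h; simp [PySem.Set.empty] at h
    · rintro ⟨j, hj, _⟩; omega
  have hb : (((PySem.Chars.len l : Int) - 1) - ((0 : Nat) : Int)).toNat = l.length - 1 := by
    simp only [PySem.Chars.len_eq]; omega
  have := pairsLoopB_seg l (l.length - 1) 0 ((PySem.Chars.len l : Int) - 1) PySem.Set.empty hb hinv
  rw [show ((0 : Nat) : Int) = (0 : Int) from rfl] at this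
  rw [this]
  unfold PairProp
  constructor
  · rintro ⟨x, _, hx, j, hj, he⟩
    have hx2 : x + 2 ≤ l.length := by omega
    exact ⟨j, x, by omega, hx2, he⟩
  · rintro ⟨i, j, hij, hj2, he⟩
    exact ⟨j, by omega, by omega, i, by omega, he⟩

-- ===== VERDICT (by name: the statement is the Claim_ definition above) =====
theorem solve_spec : Claim_equal_solve := by
  unfold Claim_equal_solve Spec_solve
  intro pz _
  unfold solve solve_alt
  congr 1
  funext nice i
  show (if pairsLoopA i.toList == true && gapLoopA i.toList == true then nice + 1 else nice) =
    (if !gapLoopB (i.toList.zip (PySem.List.slice i.toList (some 2) none)) then nice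
     else if pairsLoopB i.toList
         (PySem.List.pyRange 0 ((PySem.Chars.len i.toList : Int) - 1) 1) PySem.Set.empty
     then nice + 1
     else nice)
  have hp : pairsLoopA i.toList = pairsLoopB i.toList
      (PySem.List.pyRange 0 ((PySem.Chars.len i.toList : Int) - 1) 1) PySem.Set.empty := by
    rw [Bool.eq_iff_iff, pairsLoopA_iff, pairsB_iff]
  have hg : gapLoopA i.toList = gapLoopB (i.toList.zip (PySem.List.slice i.toList (some 2) none)) := by
    rw [Bool.eq_iff_iff, gapLoopA_iff, gapB_iff]
  rw [← hp, ← hg]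
  cases pairsLoopA i.toList <;> cases gapLoopA i.toList <;> simp
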